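-- pv_equiv track=rewrite | github.com/sboghossian/crucible | crucible/agents/course_builder.py | _parse_modules
-- ===== SOURCE A (Python) =====
-- def _parse_modules(text: str) -> list[dict[str, str]]:
--     modules: list[dict[str, str]] = []
--     current: dict[str, str] = {}
--
--     for line in text.split("\n"):
--         stripped = line.strip()
--         if stripped.upper().startswith("MODULE") and ":" in stripped:
--             if current:
--                 modules.append(current)
--             title = stripped.split(":", 1)[1].strip()
--             current = {"title": title, "content": ""}
--         elif current:
--             current["content"] = current.get("content", "") + line + "\n"
--
--     if current:
--         modules.append(current)
--
--     return modules
-- ===== SOURCE B (Python) =====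
-- def _parse_modules(text: str) -> list[dict[str, str]]:
--     lines = text.split("\n")
--
--     def is_header(line: str) -> bool:
--         s = line.strip()
--         return s.upper().startswith("MODULE") and ":" in s
--
--     idxs = [i for i, l in enumerate(lines) if is_header(l)]
--     bounds = idxs[1:] + [len(lines)]
--     modules: list[dict[str, str]] = []
--     for i, j in zip(idxs, bounds):
--         title = lines[i].strip().split(":", 1)[1].strip()
--         content = "".join(l + "\n" for l in lines[i + 1:j])
--         modules.append({"title": title, "content": content})
--     return modules
-- ===== Notes on version B (the rewrite author's own statement) =====
-- stated objective: alternative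
-- what changed: Replaces the single-pass fold that mutates an in-progress dict and grows its content string line by line with a two-pass decomposition: first collect the indices of MODULE header lines, then build each module from its header index and the slice of lines up to the next header.
import Mathlib
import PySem

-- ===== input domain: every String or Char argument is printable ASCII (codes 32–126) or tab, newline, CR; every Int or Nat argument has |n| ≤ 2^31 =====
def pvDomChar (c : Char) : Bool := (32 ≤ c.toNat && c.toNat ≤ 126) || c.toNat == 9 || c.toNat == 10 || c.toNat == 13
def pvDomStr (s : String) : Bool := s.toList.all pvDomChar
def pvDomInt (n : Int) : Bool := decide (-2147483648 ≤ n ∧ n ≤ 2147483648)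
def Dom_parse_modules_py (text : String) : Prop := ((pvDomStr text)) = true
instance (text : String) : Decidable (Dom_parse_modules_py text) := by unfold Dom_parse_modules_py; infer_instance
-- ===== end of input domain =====

-- B re-implements the single-pass accumulator parser as a two-pass header-index scan (alternative decomposition, same cost).

-- ===== PORT A =====
-- shared line-level helpers (both Pythons compute these exact expressions per line)
def pvIsHeader (line : String) : Bool :=
  let s := PySem.Str.strip line
  PySem.Str.startswith (PySem.Str.upper s) "MODULE" && PySem.Str.isIn ":" s

def pvTitleOf (line : String) : String :=
  let s := PySem.Str.strip line
  -- s.split(":", 1)[1].strip(); sep ":" ≠ "" so splitMax? is some, and callers guard ":" in s so index 1 exists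
  PySem.Str.strip (PySem.List.pyGetD ((PySem.Str.splitMax? s ":" 1).getD []) 1 "")

-- the body of A's for-loop, state = (modules, current)
def pvStepA (s : List (PySem.Dict String String) × PySem.Dict String String) (line : String) :
    List (PySem.Dict String String) × PySem.Dict String String :=
  if pvIsHeader line then
    ((if s.2.items = [] then s.1 else s.1 ++ [s.2]),
     PySem.Dict.ofList [("title", pvTitleOf line), ("content", "")])
  else if s.2.items = [] then s
  else (s.1, s.2.insert "content" (s.2.getD "content" "" ++ line ++ "\n"))

def parse_modules_py (text : String) : List (List (String × String)) :=
  -- text.split("\n"): sep ≠ "" so split? is some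
  let r := ((PySem.Str.split? text "\n").getD []).foldl pvStepA ([], PySem.Dict.empty)
  (if r.2.items = [] then r.1 else r.1 ++ [r.2]).map PySem.Dict.items

-- ===== PORT B =====
def pvIdxs (lines : List String) : List Int :=
  (PySem.List.enumerate lines).filterMap (fun p => if pvIsHeader p.2 then some p.1 else none)

def pvEntry (lines : List String) (p : Int × Int) : List (String × String) :=
  -- lines[i] is a valid index (i comes from enumerate), so pyGetD's default is never used
  [("title", pvTitleOf (PySem.List.pyGetD lines p.1 "")),
   ("content", PySem.Str.join "" ((PySem.List.slice lines (some (p.1 + 1)) (some p.2)).map (· ++ "\n")))]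

def parse_modules_py_alt (text : String) : List (List (String × String)) :=
  let lines := (PySem.Str.split? text "\n").getD []
  let idxs := pvIdxs lines
  let bounds := PySem.List.slice idxs (some 1) none ++ [(lines.length : Int)]
  (idxs.zip bounds).map (pvEntry lines)

-- ===== PRECONDITION & SPEC =====
def Spec_parse_modules_py (text : String) (out : List (List (String × String))) : Prop := out = parse_modules_py_alt text
instance (text : String) (out : List (List (String × String))) : Decidable (Spec_parse_modules_py text out) := by unfold Spec_parse_modules_py; infer_instance

-- ===== CLAIM (what is proved, stated in full; the proofs are below) =====
def Claim_equal_parse_modules_py : Prop := ∀ (text : String), Dom_parse_modules_py text → Spec_parse_modules_py text (parse_modules_py text)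

-- ===== LEMMAS AND PROOFS =====

def pvNH (x : String) : Bool := !pvIsHeader x

def pvContent (body : List String) : String := PySem.Str.join "" (body.map (· ++ "\n"))

-- the common characterisation both ports are reduced to
def pvSpec : List String → List (List (String × String))
  | [] => []
  | l :: rest =>
    if pvIsHeader l then
      [("title", pvTitleOf l), ("content", pvContent (rest.takeWhile pvNH))] :: pvSpec (rest.dropWhile pvNH)
    else pvSpec rest
termination_by ls => ls.length
decreasing_by
  · have := List.length_dropWhile_le pvNH rest; simp; omega
  · simp

def pvFinA (s : List (PySem.Dict String String) × PySem.Dict String String) : List (PySem.Dict String String) :=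
  if s.2.items = [] then s.1 else s.1 ++ [s.2]

lemma pvCharsJoin_nil (l : List (List Char)) : PySem.Chars.join [] l = l.flatten := by
  induction l with
  | nil => simp [PySem.Chars.join_nil]
  | cons a t ih =>
    cases t with
    | nil => simp [PySem.Chars.join_singleton]
    | cons b t' => rw [PySem.Chars.join_cons_cons]; simp_all

lemma pvContent_nil : pvContent [] = "" := rfl

lemma pvContent_cons (l : String) (body : List String) :
    pvContent (l :: body) = (l ++ "\n") ++ pvContent body := by
  apply String.toList_inj.mp
  simp [pvContent, PySem.Str.toList_join, pvCharsJoin_nil]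

lemma pvOfList2 (t c : String) :
    PySem.Dict.ofList [("title", t), ("content", c)] = PySem.Dict.mk [("title", t), ("content", c)] := by
  simp [PySem.Dict.ofList, PySem.Dict.update, PySem.Dict.insert, PySem.Dict.contains, PySem.Dict.empty]

lemma pvInsertContent (t c v : String) :
    (PySem.Dict.mk [("title", t), ("content", c)]).insert "content" v = PySem.Dict.mk [("title", t), ("content", v)] := by
  simp [PySem.Dict.insert, PySem.Dict.contains]

lemma pvGetDContent (t c : String) :
    (PySem.Dict.mk [("title", t), ("content", c)]).getD "content" "" = c := by
  simp [pysem]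

lemma pvA_acc (lines : List String) : ∀ (ms : List (PySem.Dict String String)) (t c : String),
    pvFinA (lines.foldl pvStepA (ms, PySem.Dict.mk [("title", t), ("content", c)])) =
      ms ++ [PySem.Dict.mk [("title", t), ("content", c ++ pvContent (lines.takeWhile pvNH))]]
         ++ (pvSpec (lines.dropWhile pvNH)).map PySem.Dict.mk := by
  induction lines with
  | nil =>
    intro ms t c
    simp [pvFinA, pvSpec, pvContent_nil]
  | cons l rest ih =>
    intro ms t c
    by_cases h : pvIsHeader l
    · have hstep : pvStepA (ms, PySem.Dict.mk [("title", t), ("content", c)]) l =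
          (ms ++ [PySem.Dict.mk [("title", t), ("content", c)]],
           PySem.Dict.mk [("title", pvTitleOf l), ("content", "")]) := by
        simp [pvStepA, h, pvOfList2]
      rw [List.foldl_cons, hstep, ih]
      simp [pvSpec, h, pvNH, pvContent_nil]
    · have hstep : pvStepA (ms, PySem.Dict.mk [("title", t), ("content", c)]) l =
          (ms, PySem.Dict.mk [("title", t), ("content", c ++ l ++ "\n")]) := by
        simp [pvStepA, h, pvInsertContent, pvGetDContent]
      rw [List.foldl_cons, hstep, ih]
      simp [h, pvNH, pvContent_cons, String.append_assoc]
lemma pvA_skip (lines : List String) : ∀ (ms : List (PySem.Dict String String)),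
    pvFinA (lines.foldl pvStepA (ms, PySem.Dict.mk [])) = ms ++ (pvSpec lines).map PySem.Dict.mk := by
  induction lines with
  | nil => intro ms; simp [pvFinA, pvSpec]
  | cons l rest ih =>
    intro ms
    by_cases h : pvIsHeader l
    · have hstep : pvStepA (ms, PySem.Dict.mk []) l =
          (ms, PySem.Dict.mk [("title", pvTitleOf l), ("content", "")]) := by
        simp [pvStepA, h, pvOfList2]
      rw [List.foldl_cons, hstep, pvA_acc]
      simp [pvSpec, h]
    · have hstep : pvStepA (ms, PySem.Dict.mk []) l = (ms, PySem.Dict.mk []) := by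
        simp [pvStepA, h]
      rw [List.foldl_cons, hstep, ih]
      simp [pvSpec, h]

lemma pvSpec_dropWhile (ls : List String) : pvSpec (ls.dropWhile pvNH) = pvSpec ls := by
  induction ls with
  | nil => simp
  | cons x r ih =>
    by_cases h : pvIsHeader x
    · simp [pvNH, h]
    · rw [List.dropWhile_cons]
      simp only [pvNH, h]
      simpa [pvSpec, h] using ih

lemma pvIdxs_shift (ls : List String) : ∀ s : Int,
    (PySem.List.enumerate ls s).filterMap (fun p => if pvIsHeader p.2 then some p.1 else none) =
      (pvIdxs ls).map (· + s) := by
  induction ls with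
  | nil => intro s; simp [pvIdxs, PySem.List.enumerate]
  | cons x t ih =>
    intro s
    have hR : pvIdxs (x :: t) = (if pvIsHeader x then [(0 : Int)] else []) ++ (pvIdxs t).map (· + 1) := by
      have htail1 : (pvIdxs t).map (· + (0 + 1)) = (pvIdxs t).map (· + 1) := by norm_num
      unfold pvIdxs
      rw [PySem.List.enumerate_cons, List.filterMap_cons, ih (0 + 1), htail1]
      by_cases h : pvIsHeader x <;> simp [h] <;> rfl
    have htail : (pvIdxs t).map (· + (s + 1)) = ((pvIdxs t).map (· + 1)).map (· + s) := by
      rw [List.map_map]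
      exact (List.map_congr_left (fun i _ => by simp only [Function.comp_apply]; omega)).symm
    rw [PySem.List.enumerate_cons, List.filterMap_cons, ih (s + 1), htail, hR]
    by_cases h : pvIsHeader x <;> simp [h]

lemma pvIdxs_cons (x : String) (t : List String) :
    pvIdxs (x :: t) = (if pvIsHeader x then [(0 : Int)] else []) ++ (pvIdxs t).map (· + 1) := by
  simp only [pvIdxs, PySem.List.enumerate_cons, List.filterMap_cons]
  rw [pvIdxs_shift t (0 + 1)]
  by_cases h : pvIsHeader x <;> simp [h] <;> rfl

lemma pvIdxs_nonneg (ls : List String) : ∀ i ∈ pvIdxs ls, 0 ≤ i := by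
  induction ls with
  | nil => simp [pvIdxs, PySem.List.enumerate]
  | cons x t ih =>
    intro i hi
    rw [pvIdxs_cons] at hi
    rcases List.mem_append.mp hi with h | h
    · by_cases hx : pvIsHeader x <;> simp [hx] at h; omega
    · obtain ⟨j, hj, rfl⟩ := List.mem_map.mp h
      have := ih j hj; omega

lemma pvIdxs_nil_takeWhile (ls : List String) (h : pvIdxs ls = []) : ls.takeWhile pvNH = ls := by
  induction ls with
  | nil => rfl
  | cons x t ih =>
    rw [pvIdxs_cons] at h
    by_cases hx : pvIsHeader x
    · simp [hx] at h
    · simp [hx] at h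
      simp [pvNH, hx, ih h]

lemma pvIdxs_nil_dropWhile (ls : List String) (h : pvIdxs ls = []) : ls.dropWhile pvNH = [] := by
  induction ls with
  | nil => rfl
  | cons x t ih =>
    rw [pvIdxs_cons] at h
    by_cases hx : pvIsHeader x
    · simp [hx] at h
    · simp [hx] at h
      simp [pvNH, hx, ih h]

lemma pvIdxs_head (ls : List String) : ∀ (i : Int) (t : List Int),
    pvIdxs ls = i :: t → i = ((ls.takeWhile pvNH).length : Int) := by
  induction ls with
  | nil => intro i t h; simp [pvIdxs, PySem.List.enumerate] at h
  | cons x r ih =>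
    intro i t h
    rw [pvIdxs_cons] at h
    by_cases hx : pvIsHeader x
    · simp [hx] at h
      simp [pvNH, hx, h.1]
    · simp [hx] at h
      cases hr : pvIdxs r with
      | nil => rw [hr] at h; simp at h
      | cons i' t' =>
        rw [hr] at h
        simp at h
        have := ih i' t' hr
        simp [pvNH, hx]
        omega

lemma pvTake_takeWhile (p : String → Bool) (ls : List String) :
    ls.take ((ls.takeWhile p).length) = ls.takeWhile p := by
  induction ls with
  | nil => rfl
  | cons x t ih =>
    by_cases h : p x <;> simp [h, ih]

lemma pvEntry_shift (x : String) (ls : List String) (i j : Int) (hi : 0 ≤ i) (hj : 0 ≤ j) :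
    pvEntry (x :: ls) (i + 1, j + 1) = pvEntry ls (i, j) := by
  obtain ⟨a, rfl⟩ : ∃ a : Nat, i = (a : Int) := ⟨i.toNat, (Int.toNat_of_nonneg hi).symm⟩
  obtain ⟨b, rfl⟩ : ∃ b : Nat, j = (b : Int) := ⟨j.toNat, (Int.toNat_of_nonneg hj).symm⟩
  unfold pvEntry
  have h1 : PySem.List.pyGetD (x :: ls) ((a : Int) + 1) "" = PySem.List.pyGetD ls (a : Int) "" := by
    have : ((a : Int) + 1) = ((a + 1 : Nat) : Int) := by push_cast; ring
    rw [this, PySem.List.pyGetD_natCast, PySem.List.pyGetD_natCast]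
    simp
  have h2 : PySem.List.slice (x :: ls) (some ((a : Int) + 1 + 1)) (some ((b : Int) + 1)) =
      PySem.List.slice ls (some ((a : Int) + 1)) (some (b : Int)) := by
    have e1 : ((a : Int) + 1 + 1) = ((a + 2 : Nat) : Int) := by push_cast; ring
    have e2 : ((b : Int) + 1) = ((b + 1 : Nat) : Int) := by push_cast; ring
    have e3 : ((a : Int) + 1) = ((a + 1 : Nat) : Int) := by push_cast; ring
    rw [e1, e2, e3, PySem.List.slice_natCast, PySem.List.slice_natCast]
    have : b + 1 - (a + 2) = b - (a + 1) := by omega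
    simp [this]
  rw [h1, h2]

lemma pvMapShift (x : String) (ls : List String) (ps : List (Int × Int))
    (h : ∀ p ∈ ps, 0 ≤ p.1 ∧ 0 ≤ p.2) :
    ps.map (pvEntry (x :: ls) ∘ Prod.map (· + 1) (· + 1)) = ps.map (pvEntry ls) := by
  apply List.map_congr_left
  intro p hp
  obtain ⟨h1, h2⟩ := h p hp
  have := pvEntry_shift x ls p.1 p.2 h1 h2
  simpa [Function.comp, Prod.map] using this

lemma pvB_main (ls : List String) :
    ((pvIdxs ls).zip (PySem.List.slice (pvIdxs ls) (some 1) none ++ [(ls.length : Int)])).map (pvEntry ls)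
      = pvSpec ls := by
  induction ls with
  | nil => simp [pvIdxs, PySem.List.enumerate, pvSpec]
  | cons x r ih =>
    rw [PySem.List.slice_from_one] at ih ⊢
    rw [pvIdxs_cons]
    have hlen2 : (((x :: r).length : Nat) : Int) = (r.length : Int) + 1 := by
      push_cast [List.length_cons]; ring
    rw [hlen2]
    by_cases h : pvIsHeader x
    · simp only [h, if_true, List.singleton_append, List.tail_cons]
      cases htc : pvIdxs r with
      | nil =>
        have htw : r.takeWhile pvNH = r := pvIdxs_nil_takeWhile r htc
        have hdw : r.dropWhile pvNH = [] := pvIdxs_nil_dropWhile r htc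
        have hget : PySem.List.pyGetD (x :: r) 0 "" = x := by simp [pysem]
        have hslice : PySem.List.slice (x :: r) (some 1) (some ((r.length : Int) + 1)) = r := by
          rw [show ((r.length : Int) + 1) = ((r.length + 1 : Nat) : Int) by push_cast; ring,
              show ((1:Int)) = ((1 : Nat) : Int) by norm_num,
              PySem.List.slice_natCast]
          simp
        simp [pvEntry, hget, hslice, pvSpec, h, htw, hdw, pvContent]
      | cons i t' =>
        rw [htc] at ih
        simp only [List.tail_cons] at ih
        have hnn := pvIdxs_nonneg r
        have hi0 : (0 : Int) ≤ i := hnn i (by rw [htc]; simp)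
        have hik : i = ((r.takeWhile pvNH).length : Int) := pvIdxs_head r i t' htc
        simp only [List.map_cons, List.cons_append, List.zip_cons_cons, List.map_cons]
        have e4 : ((i + 1) :: t'.map (· + 1)) = (i :: t').map (· + 1) := by simp
        have e5 : (t'.map (· + 1) ++ [(r.length : Int) + 1]) = (t' ++ [(r.length : Int)]).map (· + 1) := by
          simp
        rw [e4, e5, List.zip_map, List.map_map]
        have hmem : ∀ p ∈ ((i :: t').zip (t' ++ [(r.length : Int)])), 0 ≤ p.1 ∧ 0 ≤ p.2 := by
          intro p hp
          obtain ⟨h1, h2⟩ := List.of_mem_zip hp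
          refine ⟨hnn _ (by rw [htc]; exact h1), ?_⟩
          rcases List.mem_append.mp h2 with hh | hh
          · exact hnn _ (by rw [htc]; exact List.mem_cons_of_mem i hh)
          · simp at hh; rw [hh]; positivity
        rw [pvMapShift x r _ hmem, ih]
        have hget : PySem.List.pyGetD (x :: r) 0 "" = x := by simp [pysem]
        have hslice : PySem.List.slice (x :: r) (some 1) (some (i + 1)) = r.takeWhile pvNH := by
          rw [hik,
              show (((r.takeWhile pvNH).length : Int) + 1) = (((r.takeWhile pvNH).length + 1 : Nat) : Int) by
                push_cast; ring,
              show ((1:Int)) = ((1 : Nat) : Int) by norm_num,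
              PySem.List.slice_natCast]
          simp [pvTake_takeWhile]
        simp [pvEntry, hget, hslice, pvSpec, h, pvSpec_dropWhile, pvContent]
    · simp only [h, if_false, Bool.false_eq_true, List.nil_append]
      have e6 : ((pvIdxs r).map (· + 1)).tail = (pvIdxs r).tail.map (· + 1) := by
        cases pvIdxs r <;> rfl
      have e7 : ((pvIdxs r).tail.map (· + 1) ++ [(r.length : Int) + 1]) =
          ((pvIdxs r).tail ++ [(r.length : Int)]).map (· + 1) := by simp
      rw [e6, e7, List.zip_map, List.map_map]
      have hnn := pvIdxs_nonneg r
      have hmem : ∀ p ∈ ((pvIdxs r).zip ((pvIdxs r).tail ++ [(r.length : Int)])), 0 ≤ p.1 ∧ 0 ≤ p.2 := by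
        intro p hp
        obtain ⟨h1, h2⟩ := List.of_mem_zip hp
        refine ⟨hnn _ h1, ?_⟩
        rcases List.mem_append.mp h2 with hh | hh
        · exact hnn _ (List.mem_of_mem_tail hh)
        · simp at hh; rw [hh]; positivity
      rw [pvMapShift x r _ hmem, ih]
      simp [pvSpec, h]

lemma pvItems_mk (l : List (String × String)) : (PySem.Dict.mk l).items = l := rfl

-- ===== VERDICT (by name: the statement is the Claim_ definition above) =====
theorem parse_modules_py_spec : Claim_equal_parse_modules_py := by
  intro text _
  unfold Spec_parse_modules_py
  have hA' : parse_modules_py text =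
      (pvFinA ((((PySem.Str.split? text "\n").getD []).foldl pvStepA ([], PySem.Dict.mk [])))).map
        PySem.Dict.items := rfl
  have hB' : parse_modules_py_alt text =
      ((pvIdxs ((PySem.Str.split? text "\n").getD [])).zip
        (PySem.List.slice (pvIdxs ((PySem.Str.split? text "\n").getD [])) (some 1) none ++
          [((((PySem.Str.split? text "\n").getD []).length : Nat) : Int)])).map
        (pvEntry ((PySem.Str.split? text "\n").getD [])) := rfl
  rw [hA', hB', pvA_skip, pvB_main]
  rw [List.nil_append, List.map_map]
  exact (List.map_congr_left (fun l _ => pvItems_mk l)).trans (List.map_id _)
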